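-- pv_equiv track=rewrite | github.com/gu-ni/FeatureSelection | coding_test.py | solution
-- ===== SOURCE A (Python) =====
-- def solution(blocks):
--     N = len(blocks)
--     if N == 2:
--         return 2
--
--     def max_len(x, left, right):
--         while left-1 >= 0 and x[left-1] >= x[left]:
--             left -= 1
--         while right < len(x)-1 and x[right] <= x[right+1]:
--             right += 1
--         return right - left + 1
--
--     n_list = []
--     for i in range(N):
--         n = max_len(blocks, i, i)
--         n_list.append(n)
--     return max(n_list)
-- ===== SOURCE B (Python) =====
-- def solution(blocks):
--     # Two linear DP passes over run lengths instead of A's per-index O(N) scans.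
--     n = len(blocks)
--     rev = []  # right-run lengths (length of non-decreasing run starting at j), back to front
--     for i in range(n):
--         j = n - 1 - i
--         if j < n - 1 and blocks[j] <= blocks[j + 1]:
--             rev.append(rev[-1] + 1)
--         else:
--             rev.append(1)
--     right = rev[::-1]
--     best = 0
--     run = 0  # length of non-increasing run ending at i
--     for i in range(n):
--         if i > 0 and blocks[i - 1] >= blocks[i]:
--             run += 1
--         else:
--             run = 1
--         best = max(best, run + right[i] - 1)
--     return best
-- ===== Notes on version B (the rewrite author's own statement) =====
-- stated objective: faster
-- what changed: replaces A's per-index bidirectional while-loop scans (O(N^2)) by two linear DP passes computing left non-increasing and right non-decreasing run lengths, then one max over run[i]+right[i]-1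
import Mathlib
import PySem

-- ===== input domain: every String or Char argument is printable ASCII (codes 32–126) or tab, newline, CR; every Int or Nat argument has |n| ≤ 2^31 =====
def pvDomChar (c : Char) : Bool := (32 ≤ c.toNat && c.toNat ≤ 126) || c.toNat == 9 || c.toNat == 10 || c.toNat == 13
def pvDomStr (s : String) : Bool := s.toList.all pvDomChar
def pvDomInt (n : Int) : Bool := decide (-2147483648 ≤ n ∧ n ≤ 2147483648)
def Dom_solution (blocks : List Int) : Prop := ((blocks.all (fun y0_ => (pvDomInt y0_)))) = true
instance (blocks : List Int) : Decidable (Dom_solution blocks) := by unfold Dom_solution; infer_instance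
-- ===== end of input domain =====

-- B replaces A's quadratic per-index while-loop scans by two linear run-length DP passes; return values proved equal on nonempty lists.


-- ===== PORT A =====
-- first while loop of max_len: 'while left-1 >= 0 and x[left-1] >= x[left]: left -= 1'
-- (structural recursion on left; indexing is 'pyGetD ... 0' — every access A performs is in range, the default is never read)
def goLeft (x : List Int) : Nat → Nat
  | 0 => 0
  | m + 1 =>
    if PySem.List.pyGetD x (m : Int) 0 ≥ PySem.List.pyGetD x ((m : Int) + 1) 0 then goLeft x m
    else m + 1

-- second while loop of max_len: 'while right < len(x)-1 and x[right] <= x[right+1]: right += 1'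
-- (fuel makes the recursion structural; fuel = len(x) always suffices, the loop runs at most len(x)-1 times)
def goRight (x : List Int) : Nat → Nat → Nat
  | 0, r => r
  | k + 1, r =>
    if (r : Int) < PySem.List.len x - 1 ∧ PySem.List.pyGetD x (r : Int) 0 ≤ PySem.List.pyGetD x ((r : Int) + 1) 0 then
      goRight x k (r + 1)
    else r

def maxLen (x : List Int) (left right : Nat) : Int :=
  (goRight x x.length right : Int) - (goLeft x left : Int) + 1

def solution (blocks : List Int) : Int :=
  let N := PySem.List.len blocks
  if N = 2 then 2
  else
    let nList := (List.range blocks.length).map (fun i => maxLen blocks i i)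
    (PySem.List.max? nList (fun y => y)).getD 0   -- max(n_list); none (empty list) excluded by Pre_

-- ===== PORT B =====
def solution_alt (blocks : List Int) : Int :=
  let n := blocks.length
  let rev := (List.range n).foldl (fun (rev : List Int) (i : Nat) =>
      let j : Int := (n : Int) - 1 - (i : Int)
      if j < (n : Int) - 1 ∧ PySem.List.pyGetD blocks j 0 ≤ PySem.List.pyGetD blocks (j + 1) 0 then
        rev ++ [PySem.List.pyGetD rev (-1) 0 + 1]
      else rev ++ [1]) []
  let right := rev.reverse
  let s := (List.range n).foldl (fun (s : Int × Int) (i : Nat) =>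
      let run : Int :=
        if 0 < i ∧ PySem.List.pyGetD blocks ((i : Int) - 1) 0 ≥ PySem.List.pyGetD blocks (i : Int) 0
        then s.2 + 1 else 1
      (max s.1 (run + PySem.List.pyGetD right (i : Int) 0 - 1), run)) (0, 0)
  s.1

-- ===== PRECONDITION & SPEC =====
-- Pre_ excludes only the empty list, on which A's max([]) raises ValueError
def Pre_solution (blocks : List Int) : Prop := blocks ≠ []
instance (blocks : List Int) : Decidable (Pre_solution blocks) := by unfold Pre_solution; infer_instance
def pvWitness_solution : List Int := [3, 1, 2]

def Spec_solution (blocks : List Int) (out : Int) : Prop := out = solution_alt blocks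
instance (blocks : List Int) (out : Int) : Decidable (Spec_solution blocks out) := by unfold Spec_solution; infer_instance

-- ===== CLAIM (what is proved, stated in full; the proofs are below) =====
def Claim_equal_solution : Prop := ∀ (blocks : List Int), Dom_solution blocks → Pre_solution blocks → Spec_solution blocks (solution blocks)

-- ===== LEMMAS AND PROOFS =====

-- length of the non-increasing run of x ending at index i
def Lrun (x : List Int) : Nat → Int
  | 0 => 1
  | (i + 1) =>
    if PySem.List.pyGetD x (i : Int) 0 ≥ PySem.List.pyGetD x ((i : Int) + 1) 0 then Lrun x i + 1 else 1

-- length of the non-decreasing run of x starting at index i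
def Rrun (x : List Int) (i : Nat) : Int :=
  if _h : i + 1 < x.length ∧ PySem.List.pyGetD x (i : Int) 0 ≤ PySem.List.pyGetD x ((i : Int) + 1) 0
  then Rrun x (i + 1) + 1 else 1
termination_by x.length - i

theorem Lrun_pos (x : List Int) (i : Nat) : 1 ≤ Lrun x i := by
  cases i with
  | zero => simp [Lrun]
  | succ j =>
    rw [Lrun]
    split_ifs with h
    · have := Lrun_pos x j; omega
    · omega

theorem Rrun_pos (x : List Int) (i : Nat) : 1 ≤ Rrun x i := by
  rw [Rrun]
  split_ifs with h
  · have := Rrun_pos x (i + 1); omega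
  · omega
termination_by x.length - i

theorem goLeft_eq (x : List Int) (i : Nat) : (goLeft x i : Int) = (i : Int) - (Lrun x i - 1) := by
  induction i with
  | zero => simp [goLeft, Lrun]
  | succ m ih =>
    rw [goLeft, Lrun]
    by_cases h : PySem.List.pyGetD x (m : Int) 0 ≥ PySem.List.pyGetD x ((m : Int) + 1) 0
    · rw [if_pos h, if_pos h, ih]; push_cast; ring
    · rw [if_neg h, if_neg h]; push_cast; ring

theorem goRight_eq (x : List Int) (fuel r : Nat) (hf : x.length - 1 - r ≤ fuel) :
    (goRight x fuel r : Int) = (r : Int) + (Rrun x r - 1) := by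
  induction fuel generalizing r with
  | zero =>
    rw [goRight, Rrun, dif_neg ?_]
    · omega
    · intro hcon; omega
  | succ k ih =>
    rw [goRight, Rrun]
    by_cases h : r + 1 < x.length ∧ PySem.List.pyGetD x (r : Int) 0 ≤ PySem.List.pyGetD x ((r : Int) + 1) 0
    · have hg : ((r : Int) < PySem.List.len x - 1 ∧
          PySem.List.pyGetD x (r : Int) 0 ≤ PySem.List.pyGetD x ((r : Int) + 1) 0) := by
        simp only [PySem.List.len_eq]; exact ⟨by omega, h.2⟩
      rw [if_pos hg, dif_pos h, ih (r + 1) (by omega)]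
      have : ((r + 1 : Nat) : Int) = (r : Int) + 1 := by push_cast; ring
      rw [this]; ring
    · have hg : ¬ ((r : Int) < PySem.List.len x - 1 ∧
          PySem.List.pyGetD x (r : Int) 0 ≤ PySem.List.pyGetD x ((r : Int) + 1) 0) := by
        simp only [PySem.List.len_eq]
        intro hcon; exact h ⟨by omega, hcon.2⟩
      rw [if_neg hg, dif_neg h]
      omega

-- per-index value both programs compute
def val (x : List Int) (i : Nat) : Int := Lrun x i + Rrun x i - 1

theorem maxLen_eq (x : List Int) (i : Nat) : maxLen x i i = val x i := by
  unfold maxLen val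
  rw [goLeft_eq, goRight_eq x x.length i (by omega)]; ring

-- characterisation of B's first loop
theorem rev_spec (x : List Int) (k : Nat) (hk : k ≤ x.length) :
    (List.range k).foldl (fun (rev : List Int) (i : Nat) =>
      let j : Int := (x.length : Int) - 1 - (i : Int)
      if j < (x.length : Int) - 1 ∧ PySem.List.pyGetD x j 0 ≤ PySem.List.pyGetD x (j + 1) 0 then
        rev ++ [PySem.List.pyGetD rev (-1) 0 + 1]
      else rev ++ [1]) [] =
    (List.range k).map (fun i => Rrun x (x.length - 1 - i)) := by
  induction k with
  | zero => simp
  | succ m ih =>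
    have hm : m ≤ x.length := by omega
    rw [List.range_succ, List.foldl_append, List.map_append, ih hm]
    simp only [List.foldl_cons, List.foldl_nil, List.map]
    by_cases h : ((x.length : Int) - 1 - (m : Int) < (x.length : Int) - 1 ∧
        PySem.List.pyGetD x ((x.length : Int) - 1 - (m : Int)) 0 ≤
          PySem.List.pyGetD x (((x.length : Int) - 1 - (m : Int)) + 1) 0)
    · rw [if_pos h]
      have hm1 : 1 ≤ m := by omega
      -- last element of the accumulator so far
      have hne : (List.range m).map (fun i => Rrun x (x.length - 1 - i)) ≠ [] := by
        simp; omega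
      rw [PySem.List.pyGetD_neg_one _ _ hne]
      have hlen : ((List.range m).map (fun i => Rrun x (x.length - 1 - i))).length = m := by simp
      rw [List.getLast_eq_getElem]
      have hidx : ((List.range m).map (fun i => Rrun x (x.length - 1 - i)))[((List.range m).map (fun i => Rrun x (x.length - 1 - i))).length - 1]'(by omega) = Rrun x (x.length - 1 - (m - 1)) := by
        simp [hlen]
      rw [hidx]
      -- Rrun at index (x.length - 1 - m) unfolds once with the same guard
      have hj : x.length - 1 - (m - 1) = (x.length - 1 - m) + 1 := by omega
      have hcast : ((x.length - 1 - m : Nat) : Int) = (x.length : Int) - 1 - (m : Int) := by omega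
      have hr : Rrun x (x.length - 1 - m) = Rrun x ((x.length - 1 - m) + 1) + 1 := by
        rw [Rrun]
        rw [dif_pos ?_]
        refine ⟨by omega, ?_⟩
        rw [hcast]
        exact h.2
      rw [hj, ← hr]
    · rw [if_neg h]
      have hr : Rrun x (x.length - 1 - m) = 1 := by
        rw [Rrun, dif_neg ?_]
        intro hcon
        apply h
        have hcast : ((x.length - 1 - m : Nat) : Int) = (x.length : Int) - 1 - (m : Int) := by omega
        constructor
        · omega
        · rw [← hcast]; exact hcon.2
      rw [hr]

-- B's second loop: invariant over the prefix processed
theorem loop2_spec (x : List Int) (right : List Int)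
    (hr : ∀ i : Nat, i < x.length → PySem.List.pyGetD right (i : Int) 0 = Rrun x i)
    (k : Nat) (hk : k ≤ x.length) :
    (List.range k).foldl (fun (s : Int × Int) (i : Nat) =>
      let run : Int :=
        if 0 < i ∧ PySem.List.pyGetD x ((i : Int) - 1) 0 ≥ PySem.List.pyGetD x (i : Int) 0
        then s.2 + 1 else 1
      (max s.1 (run + PySem.List.pyGetD right (i : Int) 0 - 1), run)) (0, 0) =
    ((List.range k).foldl (fun b i => max b (val x i)) 0,
      if k = 0 then 0 else Lrun x (k - 1)) := by
  induction k with
  | zero => simp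
  | succ m ih =>
    have hm : m ≤ x.length := by omega
    rw [List.range_succ, List.foldl_append, List.foldl_append, ih hm]
    simp only [List.foldl_cons, List.foldl_nil]
    have hrun : (if 0 < m ∧ PySem.List.pyGetD x ((m : Int) - 1) 0 ≥ PySem.List.pyGetD x (m : Int) 0
        then (if m = 0 then 0 else Lrun x (m - 1)) + 1 else 1) = Lrun x m := by
      by_cases h0 : 0 < m
      · obtain ⟨j, rfl⟩ : ∃ j, m = j + 1 := ⟨m - 1, by omega⟩
        simp only [if_neg (by omega : ¬ (j + 1 = 0))]
        rw [Lrun]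
        have hcast : ((j + 1 : Nat) : Int) - 1 = (j : Int) := by push_cast; ring
        by_cases h : PySem.List.pyGetD x ((j : Int)) 0 ≥ PySem.List.pyGetD x ((j : Int) + 1) 0
        · rw [if_pos ⟨h0, by rw [hcast]; push_cast; exact h⟩, if_pos h]
          simp
        · rw [if_neg ?_, if_neg h]
          intro hcon
          exact h (by rw [hcast] at hcon; push_cast at hcon ⊢; exact hcon.2)
      · have hm0 : m = 0 := by omega
        subst hm0
        rw [if_neg (by simp), Lrun]
    rw [hrun, hr m (by omega)]
    simp [val]

-- helper: B equals the max of val over all indices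
theorem alt_eq_max (x : List Int) :
    solution_alt x = (List.range x.length).foldl (fun b i => max b (val x i)) 0 := by
  unfold solution_alt
  simp only []
  rw [rev_spec x x.length (le_refl _)]
  rw [loop2_spec x _ ?_ x.length (le_refl _)]
  intro i hi
  have hcast : PySem.List.pyGetD (((List.range x.length).map (fun i => Rrun x (x.length - 1 - i))).reverse) (i : Int) 0 = (((List.range x.length).map (fun i => Rrun x (x.length - 1 - i))).reverse).getD i 0 := by
    simp [PySem.List.pyGetD_natCast]
  rw [hcast, List.getD_eq_getElem?_getD]
  rw [List.getElem?_reverse (by simpa using hi)]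
  simp only [List.length_map, List.length_range, List.getElem?_map]
  rw [List.getElem?_range (by omega)]
  simp only [Option.map_some, Option.getD_some]
  congr 1
  omega


-- A (else branch) equals the same max
theorem a_eq_max (x : List Int) (hx : x ≠ []) :
    (PySem.List.max? ((List.range x.length).map (fun i => maxLen x i i)) (fun y => y)).getD 0 =
    (List.range x.length).foldl (fun b i => max b (val x i)) 0 := by
  have hlist : (List.range x.length).map (fun i => maxLen x i i) =
      (List.range x.length).map (fun i => val x i) := by
    refine List.map_congr_left ?_
    intro a ha
    exact maxLen_eq x a
  rw [hlist]
  obtain ⟨y, t, rfl⟩ : ∃ y t, x = y :: t := by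
    cases x with
    | nil => exact absurd rfl hx
    | cons y t => exact ⟨y, t, rfl⟩
  have hv : 1 ≤ val (y :: t) 0 := by
    unfold val
    have := Lrun_pos (y :: t) 0
    have := Rrun_pos (y :: t) 0
    omega
  rw [show (y :: t).length = t.length + 1 from rfl, List.range_succ_eq_map]
  simp only [List.map_cons, List.map_map, List.foldl_cons]
  rw [PySem.List.max?_id_cons, Option.getD_some]
  rw [show max 0 (val (y :: t) 0) = val (y :: t) 0 from by omega]
  rw [List.foldl_map, List.foldl_map]
  rfl

-- the N = 2 shortcut of A agrees with B
theorem alt_two (a b : Int) : solution_alt [a, b] = 2 := by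
  rw [alt_eq_max]
  have h0 : val [a, b] 0 = Rrun [a, b] 0 := by
    unfold val; simp [Lrun]
  have h1 : val [a, b] 1 = Lrun [a, b] 1 := by
    unfold val
    rw [show Rrun [a, b] 1 = 1 from by rw [Rrun]; simp]
    ring
  have hR : Rrun [a, b] 0 = if a ≤ b then 2 else 1 := by
    rw [Rrun]
    by_cases h : a ≤ b
    · rw [dif_pos ⟨by simp, by simpa [PySem.List.pyGetD] using h⟩]
      rw [show Rrun [a, b] 1 = 1 from by rw [Rrun]; simp]
      simp [h]
    · rw [dif_neg ?_, if_neg h]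
      intro hcon
      exact h (by simpa [PySem.List.pyGetD] using hcon.2)
  have hL : Lrun [a, b] 1 = if b ≤ a then 2 else 1 := by
    rw [Lrun]
    by_cases h : b ≤ a
    · rw [if_pos (by simpa [PySem.List.pyGetD] using h), if_pos h]
      simp [Lrun]
    · rw [if_neg ?_, if_neg h]
      intro hcon
      exact h (by simpa [PySem.List.pyGetD] using hcon)
  simp only [List.length_cons, List.length_nil, List.range_succ, List.range_zero,
    List.foldl_append, List.foldl_cons, List.foldl_nil, List.nil_append]
  rw [h0, h1, hR, hL]
  by_cases h : a ≤ b <;> by_cases h' : b ≤ a <;> simp [h, h'] <;> omega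

-- ===== VERDICT (by name: the statement is the Claim_ definition above) =====
theorem solution_spec : Claim_equal_solution := by
  intro blocks _hdom hpre
  unfold Spec_solution solution
  simp only [PySem.List.len_eq]
  by_cases h2 : (blocks.length : Int) = 2
  · rw [if_pos h2]
    obtain ⟨a, b, rfl⟩ : ∃ a b, blocks = [a, b] := by
      match blocks, h2 with
      | [a, b], _ => exact ⟨a, b, rfl⟩
    exact (alt_two a b).symm
  · rw [if_neg h2]
    rw [a_eq_max blocks hpre]
    exact (alt_eq_max blocks).symm
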